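-- pv_equiv track=rewrite | github.com/abel-alexander/resea | table_image.py | find_table_in_boxes
-- ===== SOURCE A (Python) =====
-- def find_table_in_boxes(boxes, cell_threshold=10, min_columns=2):
--     rows = {}
--     cols = {}
--
--     for box in boxes:
--         x, y, w, h = box
--         col_key = x // cell_threshold
--         row_key = y // cell_threshold
--
--         if col_key not in cols:
--             cols[col_key] = []
--         cols[col_key].append(box)
--
--         if row_key not in rows:
--             rows[row_key] = []
--         rows[row_key].append(box)
--
--     table_cells = list(filter(lambda r: len(r) >= min_columns, rows.values()))
--     table_cells = [sorted(row, key=lambda b: b[0]) for row in table_cells]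
--     table_cells = sorted(table_cells, key=lambda r: r[0][1])
--
--     return table_cells
-- ===== SOURCE B (Python) =====
-- def find_table_in_boxes(boxes, cell_threshold=10, min_columns=2):
--     def row_key(b):
--         x, y, w, h = b
--         return y // cell_threshold
--
--     srt = sorted(boxes, key=row_key)  # stable: equal-key boxes keep their input order
--     rows = []
--     i = 0
--     n = len(srt)
--     while i < n:  # consecutive equal-key run = one table row
--         j = i + 1
--         while j < n and row_key(srt[j]) == row_key(srt[i]):
--             j += 1
--         rows.append(srt[i:j])
--         i = j
--
--     return sorted((sorted(r, key=lambda b: b[0]) for r in rows if len(r) >= min_columns),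
--                   key=lambda r: r[0][1])
-- ===== Notes on version B (the rewrite author's own statement) =====
-- stated objective: alternative
-- what changed: Replaces the dict-based row grouping (and drops the dead `cols` dict entirely) with a stable sort on the row key followed by one linear pass that cuts the sorted list into equal-key runs; filter, per-row sort and final sort are unchanged.
import Mathlib
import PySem

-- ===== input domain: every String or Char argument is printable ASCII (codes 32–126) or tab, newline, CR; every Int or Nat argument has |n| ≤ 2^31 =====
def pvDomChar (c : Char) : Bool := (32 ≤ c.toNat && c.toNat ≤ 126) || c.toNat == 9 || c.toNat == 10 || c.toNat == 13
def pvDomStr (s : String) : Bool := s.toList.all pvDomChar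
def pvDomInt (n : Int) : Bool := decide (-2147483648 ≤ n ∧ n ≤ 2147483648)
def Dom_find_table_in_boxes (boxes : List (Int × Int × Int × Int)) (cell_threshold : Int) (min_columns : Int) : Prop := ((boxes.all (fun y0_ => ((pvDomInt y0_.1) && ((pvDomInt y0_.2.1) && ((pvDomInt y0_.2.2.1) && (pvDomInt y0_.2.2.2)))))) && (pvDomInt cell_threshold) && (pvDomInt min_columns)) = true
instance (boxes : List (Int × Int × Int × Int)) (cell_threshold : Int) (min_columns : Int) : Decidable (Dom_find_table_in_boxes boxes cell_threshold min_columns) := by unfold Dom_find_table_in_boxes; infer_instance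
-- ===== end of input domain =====

-- B replaces A's dict-based row grouping (plus the dead `cols` dict) by a stable
-- sort on the row key followed by one linear pass that cuts the sorted list into
-- equal-key runs; same return value, different traversal (objective: alternative).

-- ===== PORT A =====
def find_table_in_boxes (boxes : List (Int × Int × Int × Int)) (cell_threshold : Int) (min_columns : Int) : List (List (Int × Int × Int × Int)) :=
  -- rows = {}; cols = {}; for box in boxes: …
  let rc := boxes.foldl (fun (rc : PySem.Dict Int (List (Int × Int × Int × Int)) × PySem.Dict Int (List (Int × Int × Int × Int))) box =>
      let col_key := PySem.Int.floordiv box.1 cell_threshold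
      let row_key := PySem.Int.floordiv box.2.1 cell_threshold
      let cols := if rc.2.contains col_key then rc.2 else rc.2.insert col_key []
      let cols := cols.modify col_key [] (fun l => l ++ [box])
      let rows := if rc.1.contains row_key then rc.1 else rc.1.insert row_key []
      let rows := rows.modify row_key [] (fun l => l ++ [box])
      (rows, cols))
    (PySem.Dict.empty, PySem.Dict.empty)
  let table_cells := rc.1.values.filter (fun r => decide (min_columns ≤ PySem.List.len r))
  let table_cells := table_cells.map (fun row => PySem.List.sorted row (fun b => b.1) false)
  -- r[0][1]: every row is nonempty by construction, so headD's default is never read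
  PySem.List.sorted table_cells (fun r => (r.headD (0, 0, 0, 0)).2.1) false

-- ===== PORT B =====
-- the while loops of Source B: cut the sorted list into maximal runs of equal row key
-- (srt[i:j] = head :: takeWhile of the equal-key run)
def pvRuns {α : Type} (key : α → Int) : List α → List (List α)
  | [] => []
  | b :: rest =>
      (b :: rest.takeWhile (fun c => key c == key b)) ::
        pvRuns key (rest.dropWhile (fun c => key c == key b))
  termination_by l => l.length
  decreasing_by exact Nat.lt_succ_of_le (List.length_dropWhile_le _ _)

def find_table_in_boxes_alt (boxes : List (Int × Int × Int × Int)) (cell_threshold : Int) (min_columns : Int) : List (List (Int × Int × Int × Int)) :=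
  let row_key : (Int × Int × Int × Int) → Int := fun b => PySem.Int.floordiv b.2.1 cell_threshold
  let srt := PySem.List.sorted boxes row_key false
  let rows := pvRuns row_key srt
  -- r[0][1]: every row is nonempty by construction, so headD's default is never read
  PySem.List.sorted
    ((rows.filter (fun r => decide (min_columns ≤ PySem.List.len r))).map
      (fun r => PySem.List.sorted r (fun b => b.1) false))
    (fun r => (r.headD (0, 0, 0, 0)).2.1) false

-- ===== PRECONDITION & SPEC =====
-- Pre_ excludes cell_threshold = 0 with a nonempty box list, exactly where the Python A raises ZeroDivisionError.
def Pre_find_table_in_boxes (boxes : List (Int × Int × Int × Int)) (cell_threshold : Int) (min_columns : Int) : Prop := boxes = [] ∨ cell_threshold ≠ 0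
instance (boxes : List (Int × Int × Int × Int)) (cell_threshold : Int) (min_columns : Int) : Decidable (Pre_find_table_in_boxes boxes cell_threshold min_columns) := by unfold Pre_find_table_in_boxes; infer_instance
def pvWitness_find_table_in_boxes : (List (Int × Int × Int × Int)) × Int × Int := ([(1, 2, 3, 4), (5, 6, 7, 8)], 10, 2)
def Spec_find_table_in_boxes (boxes : List (Int × Int × Int × Int)) (cell_threshold : Int) (min_columns : Int) (out : List (List (Int × Int × Int × Int))) : Prop := out = find_table_in_boxes_alt boxes cell_threshold min_columns
instance (boxes : List (Int × Int × Int × Int)) (cell_threshold : Int) (min_columns : Int) (out : List (List (Int × Int × Int × Int))) : Decidable (Spec_find_table_in_boxes boxes cell_threshold min_columns out) := by unfold Spec_find_table_in_boxes; infer_instance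

-- ===== CLAIM (what is proved, stated in full; the proofs are below) =====
def Claim_equal_find_table_in_boxes : Prop := ∀ (boxes : List (Int × Int × Int × Int)) (cell_threshold : Int) (min_columns : Int), Dom_find_table_in_boxes boxes cell_threshold min_columns → Pre_find_table_in_boxes boxes cell_threshold min_columns → Spec_find_table_in_boxes boxes cell_threshold min_columns (find_table_in_boxes boxes cell_threshold min_columns)

-- ===== LEMMAS AND PROOFS =====

-- A's "if key not in d: d[key] = []; d[key].append(box)" is one `modify`
theorem pvStep_eq {κ : Type} [BEq κ] [LawfulBEq κ] (d : PySem.Dict κ (List β)) (k : κ) (f : List β → List β) :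
    ((if d.contains k then d else d.insert k []).modify k [] f) = d.modify k [] f := by
  by_cases h : d.contains k
  · simp [h]
  · simp only [Bool.not_eq_true] at h
    simp [PySem.Dict.modify, h, PySem.Dict.getD_insert_self,
      PySem.Dict.insert_insert_self, PySem.Dict.getD_of_not_contains d [] h]

-- stability of PySem.List.sorted: filtering on one key value recovers the input order
theorem pv_filter_insertBy_not {α : Type} (p : α → Bool) (bf : α → α → Bool) (x : α) (h : p x = false) (l : List α) :
    (PySem.List.insertBy bf x l).filter p = l.filter p := by
  induction l with
  | nil => simp [PySem.List.insertBy, h]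
  | cons y ys ih =>
    simp only [PySem.List.insertBy]
    by_cases hb : bf x y
    · simp [hb, h]
    · simp [hb, List.filter_cons, ih]

theorem pv_filter_insertBy_eq {α : Type} (key : α → Int) (x : α) (l : List α)
    (hl : l.Pairwise (fun a b => key a ≤ key b)) :
    (PySem.List.insertBy (fun a b => decide (key a < key b)) x l).filter (fun a => key a == key x)
      = l.filter (fun a => key a == key x) ++ [x] := by
  induction l with
  | nil => simp [PySem.List.insertBy]
  | cons y ys ih =>
    simp only [PySem.List.insertBy]
    rcases List.pairwise_cons.mp hl with ⟨hy, hys⟩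
    by_cases hb : key x < key y
    · simp only [decide_eq_true hb, if_true]
      have h1 : List.filter (fun a => key a == key x) (y :: ys) = [] := by
        rw [List.filter_eq_nil_iff]
        intro a ha
        rcases List.mem_cons.mp ha with rfl | ha
        · simp; omega
        · have := hy a ha; simp; omega
      rw [List.filter_cons_of_pos (by simp), h1]
      simp
    · simp only [decide_eq_false hb, List.filter_cons]
      by_cases hk : (key y == key x)
      · simp [hk, ih hys]
      · simp only [Bool.not_eq_true] at hk
        simp [hk, ih hys]

theorem pv_sorted_filter {α : Type} (key : α → Int) (xs : List α) (k : Int) :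
    (PySem.List.sorted xs key false).filter (fun a => key a == k)
      = xs.filter (fun a => key a == k) := by
  induction xs using List.reverseRecOn with
  | nil => simp [PySem.List.sorted]
  | append_singleton xs x ih =>
    have hstep : PySem.List.sorted (xs ++ [x]) key false
        = PySem.List.insertBy (fun a b => decide (key a < key b)) x (PySem.List.sorted xs key false) := by
      rw [PySem.List.sorted_eq_foldl_insertBy, PySem.List.sorted_eq_foldl_insertBy, List.foldl_append]
      rfl
    rw [hstep, List.filter_append]
    by_cases hx : (key x == k)
    · have hk : key x = k := by simpa using hx
      subst hk
      rw [pv_filter_insertBy_eq key x _ (PySem.List.sorted_pairwise xs key), ih]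
      simp
    · rw [pv_filter_insertBy_not _ _ _ (by simpa using hx), ih]
      simp [hx]

-- runs of a key-sorted list are exactly the per-key filters, over a nodup key list
theorem pv_dropWhile_gt {α : Type} (key : α → Int) (v : Int) (l : List α)
    (hpw : l.Pairwise (fun a b => key a ≤ key b)) (hge : ∀ c ∈ l, v ≤ key c) :
    ∀ c ∈ l.dropWhile (fun c => key c == v), v < key c := by
  induction l with
  | nil => simp
  | cons r l ih =>
    rcases List.pairwise_cons.mp hpw with ⟨hr, hl⟩
    by_cases hq : (key r == v)
    · rw [List.dropWhile_cons_of_pos (p := fun c => key c == v) hq]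
      exact ih hl (fun c hc => hge c (List.mem_cons_of_mem _ hc))
    · rw [List.dropWhile_cons_of_neg (p := fun c => key c == v) hq]
      intro c hc
      rcases List.mem_cons.mp hc with rfl | hc
      · have := hge c (List.mem_cons_self ..)
        simp at hq; omega
      · have h1 := hr c hc
        have h2 := hge r (List.mem_cons_self ..)
        simp at hq; omega

theorem pvRuns_spec {α : Type} (key : α → Int) (xs : List α)
    (h : xs.Pairwise (fun a b => key a ≤ key b)) :
    ∃ K : List Int, K.Nodup ∧ (∀ k, k ∈ K ↔ ∃ x ∈ xs, key x = k) ∧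
      pvRuns key xs = K.map (fun k => xs.filter (fun x => key x == k)) := by
  induction xs using pvRuns.induct key with
  | case1 => exact ⟨[], by simp, by simp, by simp [pvRuns]⟩
  | case2 b rest ih =>
    rcases List.pairwise_cons.mp h with ⟨hb, hrest⟩
    have hdw_pw : (rest.dropWhile (fun c => key c == key b)).Pairwise (fun a b => key a ≤ key b) :=
      List.Pairwise.sublist (List.dropWhile_sublist _) hrest
    have hgt := pv_dropWhile_gt key (key b) rest hrest hb
    rcases ih hdw_pw with ⟨K', hnd', hmem', heq'⟩
    have htw : ∀ c ∈ rest.takeWhile (fun c => key c == key b), key c = key b := by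
      intro c hc; simpa using List.mem_takeWhile_imp hc
    set tw := rest.takeWhile (fun c => key c == key b) with htwd
    set dw := rest.dropWhile (fun c => key c == key b) with hdwd
    have hsplit : tw ++ dw = rest := List.takeWhile_append_dropWhile
    have hdsub : dw.Sublist rest := hdwd ▸ List.dropWhile_sublist _
    refine ⟨key b :: K', ?_, ?_, ?_⟩
    · refine List.nodup_cons.mpr ⟨?_, hnd'⟩
      intro hmem
      rcases (hmem' (key b)).mp hmem with ⟨x, hx, hkx⟩
      have := hgt x hx
      omega
    · intro k
      constructor
      · intro hk
        rcases List.mem_cons.mp hk with rfl | hk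
        · exact ⟨b, List.mem_cons_self .., rfl⟩
        · rcases (hmem' k).mp hk with ⟨x, hx, hkx⟩
          exact ⟨x, List.mem_cons_of_mem _ (hdsub.subset hx), hkx⟩
      · rintro ⟨x, hx, rfl⟩
        rcases List.mem_cons.mp hx with rfl | hx
        · exact List.mem_cons_self ..
        · rw [← hsplit] at hx
          rcases List.mem_append.mp hx with hx | hx
          · rw [htw x hx]; exact List.mem_cons_self ..
          · exact List.mem_cons_of_mem _ ((hmem' (key x)).mpr ⟨x, hx, rfl⟩)
    · rw [pvRuns, ← htwd, ← hdwd, heq', List.map_cons]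
      congr 1
      · rw [List.filter_cons_of_pos (by simp), ← hsplit, List.filter_append,
          List.filter_eq_self.mpr (by intro a ha; simpa using htw a ha),
          List.filter_eq_nil_iff.mpr (by intro a ha; have := hgt a ha; simp; omega)]
        simp
      · refine List.map_congr_left ?_
        intro k hk
        rcases (hmem' k).mp hk with ⟨x, hx, hkx⟩
        have hkgt : key b < k := hkx ▸ hgt x hx
        have h1 : List.filter (fun x => key x == k) tw = [] :=
          List.filter_eq_nil_iff.mpr (fun a ha => by have := htw a ha; simp; omega)
        rw [List.filter_cons_of_neg (p := fun x => key x == k) (by simp; omega), ← hsplit,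
          List.filter_append, h1, List.nil_append]

-- A's rows dict: values, in first-occurrence key order, are the per-key filters
theorem pvRows_values (boxes : List (Int × Int × Int × Int)) (t : Int) :
    ∃ K : List Int, K.Nodup ∧ (∀ k, k ∈ K ↔ ∃ x ∈ boxes, PySem.Int.floordiv x.2.1 t = k) ∧
      (boxes.foldl (fun d b => d.modify (PySem.Int.floordiv b.2.1 t) [] (fun l => l ++ [b])) PySem.Dict.empty).values
        = K.map (fun k => boxes.filter (fun x => PySem.Int.floordiv x.2.1 t == k)) := by
  have hkeys := PySem.Dict.keys_foldl_modify_key boxes (fun b => PySem.Int.floordiv b.2.1 t) []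
    (fun _ b => (fun l => l ++ [b])) PySem.Dict.empty
  have hnd := PySem.Dict.nodup_keys_foldl_modify_key boxes (fun b => PySem.Int.floordiv b.2.1 t) []
    (fun _ b => (fun l => l ++ [b])) PySem.Dict.empty PySem.Dict.nodup_keys_empty
  have hget : ∀ k, (boxes.foldl (fun d b => d.modify (PySem.Int.floordiv b.2.1 t) [] (fun l => l ++ [b])) PySem.Dict.empty).getD k []
      = boxes.filter (fun x => PySem.Int.floordiv x.2.1 t == k) := by
    intro k
    have h1 : boxes.foldl (fun d b => d.modify (PySem.Int.floordiv b.2.1 t) [] (fun l => l ++ [b])) PySem.Dict.empty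
        = (boxes.map (fun b => (PySem.Int.floordiv b.2.1 t, b))).foldl
            (fun d p => d.modify p.1 [] (fun l => l ++ [p.2])) PySem.Dict.empty := by
      rw [List.foldl_map]
    rw [h1, PySem.Dict.getD_foldl_modify_append, PySem.Dict.getD_empty, List.filter_map, List.map_map]
    simp [Function.comp_def]
  refine ⟨_, hnd, ?_, ?_⟩
  · intro k
    rw [hkeys, PySem.Set.mem_update]
    simp [PySem.Dict.keys_empty, eq_comm]
  · rw [PySem.Dict.values_eq_map_keys _ hnd []]
    exact List.map_congr_left (fun k _ => hget k)

-- keys are distinct ⇒ the representative y-coordinates of the assembled rows are distinct,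
-- so the final sort admits a unique strictly-increasing result
theorem pv_final (t mc : Int) (boxes : List (Int × Int × Int × Int)) (KA KB : List Int)
    (hndA : KA.Nodup) (hndB : KB.Nodup)
    (hA : ∀ k, k ∈ KA ↔ ∃ x ∈ boxes, PySem.Int.floordiv x.2.1 t = k)
    (hB : ∀ k, k ∈ KB ↔ ∃ x ∈ boxes, PySem.Int.floordiv x.2.1 t = k) :
    PySem.List.sorted
      (((KA.map (fun k => boxes.filter (fun x => PySem.Int.floordiv x.2.1 t == k))).filter
          (fun r => decide (mc ≤ PySem.List.len r))).map
        (fun r => PySem.List.sorted r (fun b => b.1) false))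
      (fun r => (r.headD (0, 0, 0, 0)).2.1) false
    = PySem.List.sorted
      (((KB.map (fun k => boxes.filter (fun x => PySem.Int.floordiv x.2.1 t == k))).filter
          (fun r => decide (mc ≤ PySem.List.len r))).map
        (fun r => PySem.List.sorted r (fun b => b.1) false))
      (fun r => (r.headD (0, 0, 0, 0)).2.1) false := by
  set G : Int → List (Int × Int × Int × Int) :=
    fun k => boxes.filter (fun x => PySem.Int.floordiv x.2.1 t == k) with hG
  set S : List (Int × Int × Int × Int) → List (Int × Int × Int × Int) :=
    fun r => PySem.List.sorted r (fun b => b.1) false with hS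
  set rep : List (Int × Int × Int × Int) → Int := fun r => (r.headD (0, 0, 0, 0)).2.1 with hrep
  set P : List (Int × Int × Int × Int) → Bool := fun r => decide (mc ≤ PySem.List.len r) with hP
  -- the representative determines the key
  have hrepkey : ∀ k, (∃ x ∈ boxes, PySem.Int.floordiv x.2.1 t = k) →
      PySem.Int.floordiv (rep (S (G k))) t = k := by
    intro k hk
    rcases hk with ⟨x, hx, hkx⟩
    have hGne : G k ≠ [] := by
      have : x ∈ G k := List.mem_filter.mpr ⟨hx, by simp [hkx]⟩
      exact List.ne_nil_of_mem this
    have hSne : S (G k) ≠ [] := by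
      simp only [hS, Ne, PySem.List.sorted_eq_nil_iff]; exact hGne
    rcases hhead : S (G k) with _ | ⟨r, rs⟩
    · exact absurd hhead hSne
    · have hrmem : r ∈ S (G k) := hhead ▸ List.mem_cons_self ..
      have : r ∈ G k := ((PySem.List.mem_sorted _ _ _ _).mp (hS ▸ hrmem))
      have hrk : PySem.Int.floordiv r.2.1 t = k := by
        have := (List.mem_filter.mp (hG ▸ this)).2
        simpa using this
      simp [hrep, hrk]
  have hperm : KA.Perm KB :=
    (List.perm_ext_iff_of_nodup hndA hndB).mpr (fun k => (hA k).trans (hB k).symm)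
  have hLperm : (((KA.map G).filter P).map S).Perm (((KB.map G).filter P).map S) :=
    ((hperm.map G).filter P).map S
  -- pairwise-distinct representatives on the B-side list
  have hne : List.Pairwise (fun r s => rep r ≠ rep s) (((KB.map G).filter P).map S) := by
    rw [List.filter_map, List.map_map, List.pairwise_map]
    have : List.Pairwise (· ≠ ·) (KB.filter (P ∘ G)) := hndB.sublist List.filter_sublist
    refine this.imp_of_mem ?_
    intro a b ha hb hab
    have hamem : a ∈ KB := (List.filter_sublist).mem ha
    have hbmem : b ∈ KB := (List.filter_sublist).mem hb
    have h1 := hrepkey a ((hA a).mp ((hperm.mem_iff).mpr hamem) |>.elim (fun x hx => ⟨x, hx⟩))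
    have h2 := hrepkey b ((hA b).mp ((hperm.mem_iff).mpr hbmem) |>.elim (fun x hx => ⟨x, hx⟩))
    intro hreq
    exact hab (h1 ▸ h2 ▸ hreq ▸ rfl)
  have hys_le := PySem.List.sorted_pairwise (((KB.map G).filter P).map S) rep
  have hys_ne : List.Pairwise (fun r s => rep r ≠ rep s)
      (PySem.List.sorted (((KB.map G).filter P).map S) rep false) :=
    (List.Perm.pairwise_iff (fun h => Ne.symm h) (PySem.List.sorted_perm _ rep false)).mpr hne
  have hys_lt : List.Pairwise (fun r s => rep r < rep s)
      (PySem.List.sorted (((KB.map G).filter P).map S) rep false) :=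
    (hys_le.and hys_ne).imp (fun h => lt_of_le_of_ne h.1 h.2)
  exact PySem.List.sorted_eq_of_perm_of_pairwise_lt _ _ rep
    ((PySem.List.sorted_perm _ rep false).trans hLperm.symm) hys_lt

-- ===== VERDICT (by name: the statement is the Claim_ definition above) =====
theorem find_table_in_boxes_spec : Claim_equal_find_table_in_boxes := by
  intro boxes t mc _ _
  unfold Spec_find_table_in_boxes find_table_in_boxes find_table_in_boxes_alt
  -- collapse A's pair fold to its rows component
  have hstep : (fun (d : PySem.Dict Int (List (Int × Int × Int × Int))) (box : Int × Int × Int × Int) =>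
      (if d.contains (PySem.Int.floordiv box.2.1 t) then d else d.insert (PySem.Int.floordiv box.2.1 t) []).modify
        (PySem.Int.floordiv box.2.1 t) [] (fun l => l ++ [box]))
      = fun d box => d.modify (PySem.Int.floordiv box.2.1 t) [] (fun l => l ++ [box]) := by
    funext d box
    exact pvStep_eq d _ _
  have hA1 : (boxes.foldl (fun (rc : PySem.Dict Int (List (Int × Int × Int × Int)) × PySem.Dict Int (List (Int × Int × Int × Int))) box =>
      let col_key := PySem.Int.floordiv box.1 t
      let row_key := PySem.Int.floordiv box.2.1 t
      let cols := if rc.2.contains col_key then rc.2 else rc.2.insert col_key []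
      let cols := cols.modify col_key [] (fun l => l ++ [box])
      let rows := if rc.1.contains row_key then rc.1 else rc.1.insert row_key []
      let rows := rows.modify row_key [] (fun l => l ++ [box])
      (rows, cols)) (PySem.Dict.empty, PySem.Dict.empty)).1
      = boxes.foldl (fun d b => d.modify (PySem.Int.floordiv b.2.1 t) [] (fun l => l ++ [b])) PySem.Dict.empty := by
    rw [PySem.List.foldl_prod_mk
      (fun (d : PySem.Dict Int (List (Int × Int × Int × Int))) (box : Int × Int × Int × Int) =>
        (if d.contains (PySem.Int.floordiv box.2.1 t) then d else d.insert (PySem.Int.floordiv box.2.1 t) []).modify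
          (PySem.Int.floordiv box.2.1 t) [] (fun l => l ++ [box]))
      (fun (d : PySem.Dict Int (List (Int × Int × Int × Int))) (box : Int × Int × Int × Int) =>
        (if d.contains (PySem.Int.floordiv box.1 t) then d else d.insert (PySem.Int.floordiv box.1 t) []).modify
          (PySem.Int.floordiv box.1 t) [] (fun l => l ++ [box]))
      boxes PySem.Dict.empty PySem.Dict.empty]
    rw [hstep]
  rcases pvRows_values boxes t with ⟨KA, hndA, hmemA, hvalA⟩
  have hpw := PySem.List.sorted_pairwise boxes (fun b => PySem.Int.floordiv b.2.1 t)
  rcases pvRuns_spec (fun b => PySem.Int.floordiv b.2.1 t)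
      (PySem.List.sorted boxes (fun b => PySem.Int.floordiv b.2.1 t) false) hpw with ⟨KB, hndB, hmemB, hrunB⟩
  have hmemB' : ∀ k, k ∈ KB ↔ ∃ x ∈ boxes, PySem.Int.floordiv x.2.1 t = k := by
    intro k
    rw [hmemB k]
    constructor
    · rintro ⟨x, hx, rfl⟩
      exact ⟨x, (PySem.List.mem_sorted _ _ _ _).mp hx, rfl⟩
    · rintro ⟨x, hx, rfl⟩
      exact ⟨x, (PySem.List.mem_sorted _ _ _ _).mpr hx, rfl⟩
  have hrunB' : pvRuns (fun b => PySem.Int.floordiv b.2.1 t)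
        (PySem.List.sorted boxes (fun b => PySem.Int.floordiv b.2.1 t) false)
      = KB.map (fun k => boxes.filter (fun x => PySem.Int.floordiv x.2.1 t == k)) := by
    rw [hrunB]
    exact List.map_congr_left (fun k _ => pv_sorted_filter _ boxes k)
  simp only [hA1, hvalA, hrunB']
  exact pv_final t mc boxes KA KB hndA hndB hmemA hmemB'
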